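-- pv_equiv track=rewrite | github.com/Workata/Legacy | WikiScraper/views.py | simpleFilter
-- ===== SOURCE A (Python) =====
-- def simpleFilter(text):
--     #text.replace(" ", "")
--     upperCounter = 0
--     start = 0
--     data = []
--
--     for i in range(len(text)):
--         if text[i].isupper():
--             upperCounter+=1
--             if upperCounter == 3:
--                 data.append(text[start:i])
--                 upperCounter = 1
--                 start = i
--
--         if i == (len(text) - 1):            # last one
--             data.append(text[start:])
--     return data
-- ===== SOURCE B (Python) =====
-- def simpleFilter(text):
--     if not text:
--         return []
--     ups = [i for i, ch in enumerate(text) if ch.isupper()]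
--     bounds = [0] + ups[2::2] + [len(text)]
--     return [text[bounds[j]:bounds[j + 1]] for j in range(len(bounds) - 1)]
-- ===== Notes on version B (the rewrite author's own statement) =====
-- stated objective: alternative
-- what changed: B replaces A's single-pass stateful scan (counter reset to 1, moving start pointer, last-index check inside the loop) by a two-phase plan: collect the uppercase positions once, take every second one starting from the third as split points, and cut the text along the resulting boundary list.
import Mathlib
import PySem

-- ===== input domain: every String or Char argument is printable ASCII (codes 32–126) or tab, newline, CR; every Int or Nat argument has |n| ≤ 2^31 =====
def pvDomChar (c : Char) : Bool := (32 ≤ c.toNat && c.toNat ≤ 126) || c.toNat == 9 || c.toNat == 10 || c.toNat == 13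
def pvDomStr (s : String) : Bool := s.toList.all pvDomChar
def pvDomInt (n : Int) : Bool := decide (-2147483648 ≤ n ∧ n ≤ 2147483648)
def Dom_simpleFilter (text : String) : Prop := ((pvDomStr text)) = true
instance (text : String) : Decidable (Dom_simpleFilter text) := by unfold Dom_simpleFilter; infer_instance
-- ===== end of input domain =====

-- B collects the uppercase positions in one pass and cuts the text along computed
-- boundaries, instead of A's single stateful scan (objective: alternative).

-- ===== PORT A =====
-- the body of A's for-loop (state: upperCounter, start, data)
def bodyA (cs : List Char) (n : Int) (st : Int × Int × List String) (i : Int) :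
    Int × Int × List String :=
  let uc := st.1
  let start := st.2.1
  let data := st.2.2
  let st' :=
    if PySem.Chars.isupper (PySem.List.pyGetD cs i ' ') then
      let uc2 := uc + 1
      if uc2 = 3 then
        (1, i, data ++ [String.ofList (PySem.List.slice cs (some start) (some i))])
      else
        (uc2, start, data)
    else (uc, start, data)
  if i = n - 1 then
    (st'.1, st'.2.1, st'.2.2 ++ [String.ofList (PySem.List.slice cs (some st'.2.1) none)])
  else st'

def simpleFilter (text : String) : List String :=
  let cs := text.toList
  let n : Int := PySem.List.len cs
  ((PySem.List.pyRange 0 n).foldl (bodyA cs n)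
    ((0 : Int), (0 : Int), ([] : List String))).2.2

-- ===== PORT B =====
def simpleFilter_alt (text : String) : List String :=
  let cs := text.toList
  if cs.isEmpty then []
  else
    let ups : List Int :=
      ((PySem.List.enumerate cs).filter (fun p => PySem.Chars.isupper p.2)).map (fun p => p.1)
    let bounds : List Int :=
      0 :: (((PySem.List.slice? ups (some 2) none 2).getD []) ++ [PySem.List.len cs])
    (PySem.List.pyRange 0 (PySem.List.len bounds - 1)).map (fun j =>
      String.ofList (PySem.List.slice cs
        (some (PySem.List.pyGetD bounds j 0))
        (some (PySem.List.pyGetD bounds (j + 1) 0))))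

-- ===== PRECONDITION & SPEC =====
def Spec_simpleFilter (text : String) (out : List String) : Prop := out = simpleFilter_alt text
instance (text : String) (out : List String) : Decidable (Spec_simpleFilter text out) := by unfold Spec_simpleFilter; infer_instance

-- ===== CLAIM (what is proved, stated in full; the proofs are below) =====
def Claim_equal_simpleFilter : Prop := ∀ (text : String), Dom_simpleFilter text → Spec_simpleFilter text (simpleFilter text)

-- ===== LEMMAS AND PROOFS =====

-- indices of uppercase characters among the first m positions
def uIdx (cs : List Char) (m : Nat) : List Nat :=
  (List.range m).filter (fun i => PySem.Chars.isupper (cs.getD i ' '))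

-- every second element (positions 0, 2, 4, …)
def stride2 {α : Type} : List α → List α
  | [] => []
  | [x] => [x]
  | x :: _ :: xs => x :: stride2 xs

-- the split points: every second uppercase index starting from the third
def cutsOf (cs : List Char) (m : Nat) : List Nat := stride2 ((uIdx cs m).drop 2)

def chunkFrom (cs : List Char) (s : Nat) : List Nat → List String
  | [] => []
  | c :: rest => String.ofList ((cs.drop s).take (c - s)) :: chunkFrom cs c rest

def ucOf (cs : List Char) (m : Nat) : Nat :=
  (uIdx cs m).length - 2 * (cutsOf cs m).length

lemma stride2_length {α : Type} (l : List α) : (stride2 l).length = (l.length + 1) / 2 := by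
  induction l using stride2.induct with
  | case1 => simp [stride2]
  | case2 x => simp [stride2]
  | case3 x y xs ih => simp [stride2, ih]; omega

lemma stride2_append_singleton {α : Type} (l : List α) (x : α) :
    stride2 (l ++ [x]) = if l.length % 2 = 0 then stride2 l ++ [x] else stride2 l := by
  induction l using stride2.induct with
  | case1 => simp [stride2]
  | case2 y => simp [stride2]
  | case3 y z xs ih =>
    simp only [List.cons_append, stride2, ih, List.length_cons]
    by_cases h : xs.length % 2 = 0
    · rw [if_pos h, if_pos (by omega)]
    · rw [if_neg h, if_neg (by omega)]

lemma stride2_map {α β : Type} (f : α → β) (l : List α) :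
    stride2 (l.map f) = (stride2 l).map f := by
  induction l using stride2.induct with
  | case1 => simp [stride2]
  | case2 x => simp [stride2]
  | case3 x y xs ih => simp [stride2, ih]

lemma uIdx_succ (cs : List Char) (m : Nat) :
    uIdx cs (m + 1) =
      if PySem.Chars.isupper (cs.getD m ' ') then uIdx cs m ++ [m] else uIdx cs m := by
  unfold uIdx
  rw [List.range_succ, List.filter_append, List.filter_singleton]
  by_cases h : PySem.Chars.isupper (cs.getD m ' ')
  · simp only [List.getD] at h ⊢
    simp [h]
  · simp only [List.getD] at h ⊢
    simp [h]

lemma chunkFrom_append (cs : List Char) (cuts : List Nat) (s x : Nat) :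
    chunkFrom cs s (cuts ++ [x]) =
      chunkFrom cs s cuts ++
        [String.ofList ((cs.drop (cuts.getLastD s)).take (x - cuts.getLastD s))] := by
  induction cuts generalizing s with
  | nil => simp [chunkFrom]
  | cons c rest ih =>
    rw [List.cons_append]
    show chunkFrom cs s (c :: (rest ++ [x])) = _
    rw [show chunkFrom cs s (c :: (rest ++ [x])) = String.ofList ((cs.drop s).take (c - s)) :: chunkFrom cs c (rest ++ [x]) from rfl]
    rw [ih c, List.getLastD_cons]
    rfl

def stA (cs : List Char) (m : Nat) : Int × Int × List String :=
  ((ucOf cs m : Int), ((cutsOf cs m).getLastD 0 : Int), chunkFrom cs 0 (cutsOf cs m))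

-- A's loop body without the last-index append
def gA (cs : List Char) (st : Int × Int × List String) (i : Int) : Int × Int × List String :=
  if PySem.Chars.isupper (PySem.List.pyGetD cs i ' ') then
    if st.1 + 1 = 3 then
      (1, i, st.2.2 ++ [String.ofList (PySem.List.slice cs (some st.2.1) (some i))])
    else (st.1 + 1, st.2.1, st.2.2)
  else (st.1, st.2.1, st.2.2)

lemma step_gA (cs : List Char) (m : Nat) :
    gA cs (stA cs m) (m : Int) = stA cs (m + 1) := by
  unfold gA stA
  rw [PySem.List.pyGetD_natCast]
  have hL : (cutsOf cs m).length = ((uIdx cs m).length - 2 + 1) / 2 := by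
    unfold cutsOf; rw [stride2_length]; simp
  have hL1 : (cutsOf cs (m + 1)).length = ((uIdx cs (m + 1)).length - 2 + 1) / 2 := by
    unfold cutsOf; rw [stride2_length]; simp
  have huc : ucOf cs m = (uIdx cs m).length - 2 * (cutsOf cs m).length := rfl
  have huc1 : ucOf cs (m + 1) = (uIdx cs (m + 1)).length - 2 * (cutsOf cs (m + 1)).length := rfl
  by_cases hu : PySem.Chars.isupper (cs.getD m ' ')
  · simp only [hu, if_true]
    have hU : uIdx cs (m + 1) = uIdx cs m ++ [m] := by rw [uIdx_succ, if_pos hu]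
    have hk1 : (uIdx cs (m + 1)).length = (uIdx cs m).length + 1 := by rw [hU]; simp
    by_cases hsplit : (ucOf cs m : Int) + 1 = 3
    · have huc2 : ucOf cs m = 2 := by omega
      have hkge : 2 ≤ (uIdx cs m).length ∧ ((uIdx cs m).length - 2) % 2 = 0 := by
        rw [huc, hL] at huc2; omega
      have hcuts1 : cutsOf cs (m + 1) = cutsOf cs m ++ [m] := by
        unfold cutsOf
        rw [hU, List.drop_append, show (2 - (uIdx cs m).length) = 0 from by omega,
          List.drop_zero, stride2_append_singleton,
          if_pos (by simp; omega : ((uIdx cs m).drop 2).length % 2 = 0)]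
      rw [if_pos hsplit, hcuts1]
      have hnuc : ucOf cs (m + 1) = 1 := by
        rw [huc1, hL1, hk1]; omega
      simp only [Prod.mk.injEq]
      refine ⟨by rw [hnuc]; norm_num, by simp, ?_⟩
      rw [chunkFrom_append, PySem.List.slice_natCast]
    · have hne2 : ucOf cs m ≠ 2 := by
        intro hc; exact hsplit (by rw [hc]; norm_num)
      have hcuts1 : cutsOf cs (m + 1) = cutsOf cs m := by
        unfold cutsOf
        rw [hU, List.drop_append]
        by_cases h2 : 2 ≤ (uIdx cs m).length
        · have hpar : ((uIdx cs m).length - 2) % 2 = 1 := by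
            rw [huc, hL] at hne2; omega
          rw [show (2 - (uIdx cs m).length) = 0 from by omega, List.drop_zero,
            stride2_append_singleton, if_neg (by simp; omega)]
        · have h1 : ((uIdx cs m).drop 2) = [] := List.drop_eq_nil_of_le (by omega)
          have h2' : ([m] : List Nat).drop (2 - (uIdx cs m).length) = [] := by
            apply List.drop_eq_nil_of_le; simp; omega
          rw [h1, h2']
          simp
      have hnuc : ucOf cs (m + 1) = ucOf cs m + 1 := by
        rw [huc1, huc, hcuts1, hk1, hL]
        by_cases h2 : 2 ≤ (uIdx cs m).length
        · have hpar : ((uIdx cs m).length - 2) % 2 = 1 := by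
            rw [huc, hL] at hne2; omega
          omega
        · rw [huc, hL] at hne2
          omega
      rw [if_neg hsplit]
      have hcast : (ucOf cs m : Int) + 1 = (ucOf cs (m + 1) : Int) := by
        rw [hnuc]; push_cast; ring
      rw [hcast, hcuts1]
  · have hU : uIdx cs (m + 1) = uIdx cs m := by rw [uIdx_succ, if_neg hu]
    have h1 : cutsOf cs (m + 1) = cutsOf cs m := by unfold cutsOf; rw [hU]
    simp only [hu, if_false, Bool.false_eq_true]
    rw [huc1, h1, hU, ← huc]

-- closed form shared by both programs on nonempty input
def model (cs : List Char) : List String :=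
  chunkFrom cs 0 (cutsOf cs cs.length) ++
    [String.ofList (cs.drop ((cutsOf cs cs.length).getLastD 0))]

lemma stA_zero (cs : List Char) : stA cs 0 = ((0 : Int), (0 : Int), ([] : List String)) := by
  simp [stA, ucOf, cutsOf, uIdx, stride2, chunkFrom]

lemma bodyA_ne (cs : List Char) (n : Int) (st : Int × Int × List String) (i : Int)
    (h : i ≠ n - 1) : bodyA cs n st i = gA cs st i := by
  unfold bodyA gA
  simp only [if_neg h]

lemma loop_gA (cs : List Char) (m : Nat) :
    (PySem.List.pyRange 0 (m : Int)).foldl (gA cs) (stA cs 0) = stA cs m := by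
  induction m with
  | zero => simp [PySem.List.pyRange]
  | succ m ih =>
    rw [show ((m + 1 : Nat) : Int) = (m : Int) + 1 from by push_cast; ring,
      PySem.List.pyRange_one_succ_right (by positivity), List.foldl_append, ih]
    simp [step_gA]

lemma simpleFilter_eq_model (text : String) (h : text.toList ≠ []) :
    simpleFilter text = model text.toList := by
  unfold simpleFilter
  have hn : 1 ≤ text.toList.length := by
    cases hcs : text.toList with
    | nil => exact absurd hcs h
    | cons a l => simp
  have hlen : PySem.List.len text.toList = (text.toList.length : Int) := by
    simp [PySem.List.len]
  simp only [hlen]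
  rw [show (text.toList.length : Int) = ((text.toList.length - 1 : Nat) : Int) + 1 from by omega,
    PySem.List.pyRange_one_succ_right (by positivity), List.foldl_append]
  rw [PySem.List.foldl_congr_mem (PySem.List.pyRange 0 ((text.toList.length - 1 : Nat) : Int))
    (bodyA text.toList (((text.toList.length - 1 : Nat) : Int) + 1)) (gA text.toList) _ (by
      intro acc x hx
      have hxlt : x < ((text.toList.length - 1 : Nat) : Int) :=
        (PySem.List.mem_pyRange_one.mp hx).2
      exact bodyA_ne _ _ _ _ (by omega))]
  rw [← stA_zero text.toList, loop_gA]
  have hstep := step_gA text.toList (text.toList.length - 1)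
  rw [show text.toList.length - 1 + 1 = text.toList.length from by omega] at hstep
  simp only [List.foldl_cons, List.foldl_nil]
  unfold bodyA
  simp only [gA] at hstep
  rw [if_pos (by omega : ((text.toList.length - 1 : Nat) : Int) = (((text.toList.length - 1 : Nat) : Int) + 1) - 1)]
  rw [hstep]
  unfold model stA
  rw [PySem.List.slice_from_natCast]

lemma stride2_filterMap {α : Type} (l : List α) :
    List.filterMap (fun k => l[2 * k]?) (List.range ((l.length + 1) / 2)) = stride2 l := by
  induction l using stride2.induct with
  | case1 => simp [stride2]
  | case2 x => simp [stride2]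
  | case3 x y xs ih =>
    have hlen : ((x :: y :: xs).length + 1) / 2 = (xs.length + 1) / 2 + 1 := by
      simp; omega
    rw [hlen, List.range_succ_eq_map, List.filterMap_cons, List.filterMap_map]
    have hf : ((fun (k : Nat) => (x :: y :: xs)[2 * k]?) ∘ Nat.succ) = (fun (k : Nat) => xs[2 * k]?) := by
      funext k
      show (x :: y :: xs)[2 * (k + 1)]? = xs[2 * k]?
      rw [show 2 * (k + 1) = (2 * k + 1) + 1 from by ring,
        List.getElem?_cons_succ, List.getElem?_cons_succ]
    rw [hf, ih]
    rfl

lemma slice2_eq_stride2 {α : Type} (l : List α) :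
    PySem.List.slice? l (some 2) none 2 = some (stride2 (l.drop 2)) := by
  unfold PySem.List.slice? PySem.List.sliceIndices
  norm_num
  by_cases h : 2 < l.length
  · rw [if_pos h]
    have hmin : min (2 : Int) (l.length : Int) = 2 := by omega
    rw [hmin]
    have hc : (((l.length : Int) - 2 + 2 - 1) / 2).toNat = ((l.drop 2).length + 1) / 2 := by
      simp only [List.length_drop]
      omega
    rw [hc, ← stride2_filterMap (l.drop 2)]
    congr 1
    funext x
    rw [show ((2:Int) + 2 * (x:Nat)).toNat = 2 + 2 * x from by omega, List.getElem?_drop]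
  · rw [if_neg h]
    have hd : l.drop 2 = [] := List.drop_eq_nil_of_le (by omega)
    simp [hd, stride2]

lemma getD_map_natCast (l : List Nat) (j : Nat) :
    (l.map (fun k : Nat => (k : Int))).getD j 0 = ((l.getD j 0 : Nat) : Int) := by
  induction l generalizing j with
  | nil => simp
  | cons a t ih =>
    cases j with
    | zero => simp
    | succ j => simpa using ih j

lemma ups_eq (cs : List Char) :
    ((PySem.List.enumerate cs).filter (fun p => PySem.Chars.isupper p.2)).map (fun p => p.1)
      = (uIdx cs cs.length).map (fun k : Nat => (k : Int)) := by
  rw [PySem.List.enumerate_eq_map_pyRange cs ' ',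
    show PySem.List.len cs = ((cs.length : Nat) : Int) from by simp [PySem.List.len],
    PySem.List.pyRange_zero_natCast]
  unfold uIdx
  simp [List.filter_map, List.map_map, Function.comp_def, PySem.List.pyGetD_natCast, List.getD]

lemma chunksNat (cs : List Char) (cuts : List Nat) (s : Nat) :
    (List.range (cuts.length + 1)).map (fun j =>
        String.ofList ((cs.drop ((s :: (cuts ++ [cs.length])).getD j 0)).take
          (((s :: (cuts ++ [cs.length])).getD (j + 1) 0) - (s :: (cuts ++ [cs.length])).getD j 0)))
      = chunkFrom cs s cuts ++ [String.ofList (cs.drop (cuts.getLastD s))] := by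
  induction cuts generalizing s with
  | nil =>
    have ht : (cs.drop s).take (cs.length - s) = cs.drop s := by
      apply List.take_of_length_le; simp
    simp [chunkFrom, ht]
  | cons c rest ih =>
    rw [show (c :: rest).length + 1 = (rest.length + 1) + 1 from rfl,
      List.range_succ_eq_map, List.map_cons, List.map_map]
    have hfun : ((fun j => String.ofList ((cs.drop ((s :: ((c :: rest) ++ [cs.length])).getD j 0)).take ((((s :: ((c :: rest) ++ [cs.length])).getD (j + 1) 0)) - ((s :: ((c :: rest) ++ [cs.length])).getD j 0)))) ∘ Nat.succ)
        = (fun j => String.ofList ((cs.drop ((c :: (rest ++ [cs.length])).getD j 0)).take ((((c :: (rest ++ [cs.length])).getD (j + 1) 0)) - ((c :: (rest ++ [cs.length])).getD j 0)))) := by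
      funext j
      simp
    rw [hfun, ih c]
    show _ = chunkFrom cs s (c :: rest) ++ [String.ofList (cs.drop ((c :: rest).getLastD s))]
    rw [List.getLastD_cons]
    rfl

lemma simpleFilter_alt_eq_model (text : String) (h : text.toList ≠ []) :
    simpleFilter_alt text = model text.toList := by
  have hne : text.toList.isEmpty = false := by simpa using h
  simp only [simpleFilter_alt, hne, Bool.false_eq_true, if_false]
  rw [ups_eq text.toList, slice2_eq_stride2]
  have hmd : ((uIdx text.toList text.toList.length).map (fun k : Nat => (k : Int))).drop 2
      = ((uIdx text.toList text.toList.length).drop 2).map (fun k : Nat => (k : Int)) := by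
    simp
  rw [hmd, stride2_map, Option.getD_some]
  have hbounds : (0 : Int) :: ((stride2 ((uIdx text.toList text.toList.length).drop 2)).map (fun k : Nat => (k : Int)) ++ [PySem.List.len text.toList])
      = ((0 :: (cutsOf text.toList text.toList.length ++ [text.toList.length])).map (fun k : Nat => (k : Int))) := by
    simp [cutsOf, PySem.List.len]
  rw [hbounds]
  have hlenb : PySem.List.len ((0 :: (cutsOf text.toList text.toList.length ++ [text.toList.length])).map (fun k : Nat => (k : Int))) - 1
      = (((cutsOf text.toList text.toList.length).length + 1 : Nat) : Int) := by
    simp [PySem.List.len]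
  rw [hlenb, PySem.List.pyRange_zero_natCast, List.map_map]
  unfold model
  rw [← chunksNat text.toList (cutsOf text.toList text.toList.length) 0]
  apply List.map_congr_left
  intro j hj
  simp only [Function.comp_def]
  rw [PySem.List.pyGetD_natCast,
    show ((j : Int) + 1) = (((j + 1 : Nat)) : Int) from by push_cast; ring,
    PySem.List.pyGetD_natCast, getD_map_natCast, getD_map_natCast,
    PySem.List.slice_natCast]

-- ===== VERDICT (by name: the statement is the Claim_ definition above) =====
theorem simpleFilter_spec : Claim_equal_simpleFilter := by
  intro text _
  unfold Spec_simpleFilter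
  by_cases h : text.toList = []
  · unfold simpleFilter simpleFilter_alt
    rw [h]
    norm_num [PySem.List.len, PySem.List.pyRange]
  · rw [simpleFilter_eq_model text h, simpleFilter_alt_eq_model text h]
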